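-- pv_equiv track=rewrite | github.com/Amit258012/100daysofcode | Day76/perfect_squares.py | numSquares
-- ===== SOURCE A (Python) =====
-- def numSquares(n: int) -> int:
--     # Step 1: Initialize a list 'dp' to store the minimum number of perfect squares for each value up to n.
--     dp = [i for i in range(n + 1)]
--
--     # Step 2: Iterate over each number from 0 to n.
--     for i in range(n + 1):
--         j = 1
--
--         # Step 3: While the square of j is less than or equal to i, update dp[i] with the minimum value.
--         while j * j <= i:
--             dp[i] = min(dp[i], dp[i - (j * j)] + 1)
--             j += 1
--
--     # Return the result for n, which is stored at dp[-1].
--     return dp[-1]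
-- ===== SOURCE B (Python) =====
-- def numSquares(n: int) -> int:
--     # Breadth-first search on residuals: start from n, each edge subtracts one
--     # perfect square; the BFS level at which 0 is reached is the answer.
--     squares = []
--     j = 1
--     while j * j <= n:
--         squares.append(j * j)
--         j += 1
--     visited = [False] * (n + 1)
--     visited[n] = True
--     frontier = [n]
--     for steps in range(1, n + 1):
--         nxt = []
--         for r in frontier:
--             for sq in squares:
--                 if sq > r:
--                     break
--                 m = r - sq
--                 if m == 0:
--                     return steps
--                 if not visited[m]:
--                     visited[m] = True
--                     nxt.append(m)
--         frontier = nxt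
--     return 0
-- ===== Notes on version B (the rewrite author's own statement) =====
-- stated objective: faster
-- what changed: Replaces A's bottom-up DP table (for every amount, rescan all squares) by a breadth-first search over residuals starting at n: each BFS edge subtracts one perfect square, a visited array prevents re-expansion, and the level at which 0 is first generated is returned.
import Mathlib
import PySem

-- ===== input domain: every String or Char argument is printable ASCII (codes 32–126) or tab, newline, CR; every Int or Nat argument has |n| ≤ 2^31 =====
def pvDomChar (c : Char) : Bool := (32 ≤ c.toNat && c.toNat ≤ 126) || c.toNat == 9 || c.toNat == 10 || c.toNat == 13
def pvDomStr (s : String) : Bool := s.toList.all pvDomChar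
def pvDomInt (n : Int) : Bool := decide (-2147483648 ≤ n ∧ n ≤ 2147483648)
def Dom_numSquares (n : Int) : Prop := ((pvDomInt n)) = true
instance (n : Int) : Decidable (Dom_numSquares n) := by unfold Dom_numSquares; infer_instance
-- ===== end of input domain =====

-- B replaces A's bottom-up DP table by a breadth-first search over residuals
-- (subtract one square per edge, visited array, return the level reaching 0);
-- a timing run measured B faster on the large inputs (early BFS exit).

-- ===== PORT A =====
-- while j*j <= i: dp[i] = min(dp[i], dp[i-j*j]+1); j += 1
def numSquaresInner (dp : Array Int) (i : Int) (j : Nat) : Array Int :=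
  if h : ((j : Int) * j) ≤ i then
    numSquaresInner
      (dp.setIfInBounds i.toNat
        (min (dp.getD i.toNat 0) (dp.getD (i - (j : Int) * j).toNat 0 + 1)))
      i (j + 1)
  else dp
termination_by (i + 1 - (j : Int) * j).toNat
decreasing_by
  have hjj : ((j : Int)) * j < ((j : Int) + 1) * ((j : Int) + 1) := by nlinarith [Int.natCast_nonneg j]
  push_cast
  omega

def numSquares (n : Int) : Int :=
  let dp0 := (PySem.List.pyRange 0 (n + 1) 1).toArray
  let dp := (PySem.List.pyRange 0 (n + 1) 1).foldl (fun d i => numSquaresInner d i 1) dp0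
  PySem.List.pyGetD dp.toList (-1) 0

-- ===== PORT B =====
-- squares = []; j = 1; while j*j <= n: squares.append(j*j); j += 1
def altSquares (n : Int) (j : Nat) : List Int :=
  if h : ((j : Int) * j) ≤ n then ((j : Int) * j) :: altSquares n (j + 1) else []
termination_by (n + 1 - (j : Int) * j).toNat
decreasing_by
  have hjj : ((j : Int)) * j < ((j : Int) + 1) * ((j : Int) + 1) := by nlinarith [Int.natCast_nonneg j]
  push_cast
  omega

-- for sq in squares: if sq > r: break; m = r - sq; if m == 0: return steps;
-- if not visited[m]: visited[m] = True; nxt.append(m)   (none = the early return)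
def altExpand (r : Int) (squares : List Int) (v : Array Bool) (nxt : List Int) :
    Option (Array Bool × List Int) :=
  match squares with
  | [] => some (v, nxt)
  | sq :: rest =>
    if r < sq then some (v, nxt)
    else
      let m := r - sq
      if m = 0 then none
      else if v.getD m.toNat false then altExpand r rest v nxt
      else altExpand r rest (v.setIfInBounds m.toNat true) (nxt ++ [m])

-- for r in frontier: ...
def altLevel (squares : List Int) (frontier : List Int) (v : Array Bool) (nxt : List Int) :
    Option (Array Bool × List Int) :=
  match frontier with
  | [] => some (v, nxt)
  | r :: rest =>
    match altExpand r squares v nxt with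
    | none => none
    | some (v', nxt') => altLevel squares rest v' nxt'

-- for steps in range(1, n+1): ...; fall-through returns 0
def altLoop (squares : List Int) (steps : List Int) (v : Array Bool) (frontier : List Int) : Int :=
  match steps with
  | [] => 0
  | s :: rest =>
    match altLevel squares frontier v [] with
    | none => s
    | some (v', nxt) => altLoop squares rest v' nxt

def numSquares_alt (n : Int) : Int :=
  let squares := altSquares n 1
  let visited := ((List.replicate (n + 1).toNat false).toArray).setIfInBounds n.toNat true
  altLoop squares (PySem.List.pyRange 1 (n + 1) 1) visited [n]

-- ===== PRECONDITION & SPEC =====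
-- Pre_ excludes n < 0, where Python A raises IndexError (dp[-1] on an empty list).
def Pre_numSquares (n : Int) : Prop := 0 ≤ n
instance (n : Int) : Decidable (Pre_numSquares n) := by unfold Pre_numSquares; infer_instance
def pvWitness_numSquares : Int := (12)
def Spec_numSquares (n : Int) (out : Int) : Prop := out = numSquares_alt n
instance (n : Int) (out : Int) : Decidable (Spec_numSquares n out) := by unfold Spec_numSquares; infer_instance

-- ===== CLAIM (what is proved, stated in full; the proofs are below) =====
def Claim_equal_numSquares : Prop := ∀ (n : Int), Dom_numSquares n → Pre_numSquares n → Spec_numSquares n (numSquares n)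

-- ===== LEMMAS AND PROOFS =====

-- mU i is the true minimum number of positive perfect squares summing to i;
-- both ports are proved to compute mU n.
def sqsum (l : List Nat) : Nat := (l.map (fun j => j * j)).sum

def IsRepU (i c : Nat) : Prop :=
  ∃ l : List Nat, (∀ j ∈ l, 1 ≤ j) ∧ sqsum l = i ∧ l.length = c

noncomputable def mU (i : Nat) : Nat := sInf {c | IsRepU i c}

theorem sqsum_replicate_one (i : Nat) : sqsum (List.replicate i 1) = i := by
  simp [sqsum, List.map_replicate]

theorem repU_ones (i : Nat) : IsRepU i i :=
  ⟨List.replicate i 1, by intro j hj; simp at hj; omega, sqsum_replicate_one i, by simp⟩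

theorem mU_le {i c : Nat} (h : IsRepU i c) : mU i ≤ c := Nat.sInf_le h

theorem mU_le_self (i : Nat) : mU i ≤ i := mU_le (repU_ones i)

theorem mem_mU (i : Nat) : IsRepU i (mU i) :=
  Nat.sInf_mem (s := {c | IsRepU i c}) ⟨i, repU_ones i⟩

theorem mU_zero : mU 0 = 0 :=
  Nat.le_zero.mp (mU_le ⟨[], by simp, by simp [sqsum], rfl⟩)

theorem mU_eq_zero {i : Nat} (h : mU i = 0) : i = 0 := by
  obtain ⟨l, _, hsum, hlen⟩ := mem_mU i
  rw [h, List.length_eq_zero_iff] at hlen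
  subst hlen
  simpa [sqsum] using hsum.symm

theorem sq_le_of_mem {l : List Nat} {j : Nat} (hj : j ∈ l) : j * j ≤ sqsum l := by
  have := List.single_le_sum (l := l.map (fun j => j * j)) (by intro x _; omega)
    (j * j) (List.mem_map_of_mem hj)
  simpa [sqsum] using this

theorem mU_cons {j i : Nat} (hj : 1 ≤ j) (hji : j * j ≤ i) : mU i ≤ mU (i - j * j) + 1 := by
  obtain ⟨l, hmem, hsum, hlen⟩ := mem_mU (i - j * j)
  refine mU_le ⟨j :: l, ?_, ?_, by simp [hlen]⟩
  · intro x hx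
    rcases List.mem_cons.mp hx with h | h
    · omega
    · exact hmem x h
  · simp only [sqsum, List.map_cons, List.sum_cons]
    unfold sqsum at hsum
    omega

theorem mU_witness {i : Nat} (hi : 1 ≤ i) :
    ∃ j, 1 ≤ j ∧ j * j ≤ i ∧ mU i = mU (i - j * j) + 1 := by
  obtain ⟨l, hmem, hsum, hlen⟩ := mem_mU i
  match l, hlen with
  | [], hlen =>
    simp [sqsum] at hsum
    omega
  | j :: t, hlen =>
    have hj : 1 ≤ j := hmem j (by simp)
    have hjsq : j * j ≤ i := hsum ▸ sq_le_of_mem (by simp)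
    have htrep : IsRepU (i - j * j) (mU i - 1) := by
      refine ⟨t, fun x hx => hmem x (by simp [hx]), ?_, ?_⟩
      · simp only [sqsum, List.map_cons, List.sum_cons] at hsum
        unfold sqsum
        omega
      · simp at hlen
        omega
    have h1 := mU_le htrep
    have h2 := mU_cons hj hjsq
    have h3 : 1 ≤ mU i := by
      simp at hlen
      omega
    exact ⟨j, hj, hjsq, by omega⟩

-- bridges between Array reads/writes and their toList counterparts
theorem arrGetD {α : Type} [Inhabited α] (a : Array α) (i : Nat) (d : α) :
    a.getD i d = a.toList.getD i d := by
  unfold Array.getD List.getD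
  split
  · rw [List.getElem?_eq_getElem (by simpa using by omega)]
    simp [Array.getElem_toList]
  · rw [List.getElem?_eq_none (by simpa using by omega)]
    rfl

theorem listGetD_set {α : Type} (l : List α) (n m : Nat) (v d : α) (hn : n < l.length) :
    (l.set n v).getD m d = if m = n then v else l.getD m d := by
  by_cases hm : m < l.length
  · rw [List.getD_eq_getElem _ _ (by simpa using hm)]
    by_cases h : m = n
    · subst h
      rw [if_pos rfl, List.getElem_set_self _]
    · rw [if_neg h, List.getElem_set_ne (by omega) _, List.getD_eq_getElem _ _ hm]
  · rw [if_neg (by omega)]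
    unfold List.getD
    rw [List.getElem?_eq_none (by simpa using by omega), List.getElem?_eq_none (by omega)]

-- ===== A-side proof: numSquares n = mU n =====

-- value accumulated by A's inner while loop (reads dp only below index i)
def innerVal (dp : List Int) (i : Int) (v : Int) (j : Nat) : Int :=
  if h : ((j : Int) * j) ≤ i then
    innerVal dp i (min v (dp.getD (i - (j : Int) * j).toNat 0 + 1)) (j + 1)
  else v
termination_by (i + 1 - (j : Int) * j).toNat
decreasing_by
  have hjj : ((j : Int)) * j < ((j : Int) + 1) * ((j : Int) + 1) := by nlinarith [Int.natCast_nonneg j]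
  push_cast
  omega

theorem innerVal_congr (dp dp' : List Int) (i v : Int) (j : Nat) (hj : 1 ≤ j)
    (h : ∀ t : Int, 0 ≤ t → t < i → dp'.getD t.toNat 0 = dp.getD t.toNat 0) :
    innerVal dp' i v j = innerVal dp i v j := by
  fun_induction innerVal dp' i v j with
  | case1 v j hcond ih =>
    conv_rhs => rw [innerVal]
    rw [dif_pos hcond]
    have hlt : i - (j : Int) * j < i := by
      have h1 : (1 : Int) ≤ (j : Int) := by exact_mod_cast hj
      nlinarith
    have hge : (0 : Int) ≤ i - (j : Int) * j := by omega
    rw [h _ hge hlt] at ih ⊢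
    exact ih (by omega)
  | case2 v j hcond =>
    conv_rhs => rw [innerVal]
    rw [dif_neg hcond]

-- A's inner while loop only rewrites index i, with the fold-of-mins value
theorem numSquaresInner_eq_set_fuel (k : Nat) (f : Nat) :
    ∀ j : Nat, 1 ≤ j → k + 2 ≤ f + j → ∀ dp : Array Int, k < dp.size →
    (numSquaresInner dp (k : Int) j).toList =
      dp.toList.set k (innerVal dp.toList (k : Int) (dp.toList.getD k 0) j) := by
  induction f with
  | zero =>
    intro j hj hf dp hk
    have hcond : ¬ ((j : Int) * j ≤ (k : Int)) := by
      have h1 : k < j := by omega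
      have h2 : k < j * j := by nlinarith
      push_cast
      exact_mod_cast not_le.mpr (by exact_mod_cast h2)
    rw [numSquaresInner, dif_neg hcond]
    conv_rhs => rw [innerVal]
    rw [dif_neg hcond, List.getD_eq_getElem _ _ (by simpa using hk), List.set_getElem_self]
  | succ f ih =>
    intro j hj hf dp hk
    have hk' : k < dp.toList.length := by simpa using hk
    by_cases hcond : ((j : Int) * j ≤ (k : Int))
    · rw [numSquaresInner, dif_pos hcond]
      rw [Int.toNat_natCast, arrGetD, arrGetD]
      set m := min (dp.toList.getD k 0)
          (dp.toList.getD ((k : Int) - (j : Int) * j).toNat 0 + 1) with hm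
      have hsz : k < (dp.setIfInBounds k m).size := by
        rw [Array.size_setIfInBounds]
        exact hk
      rw [ih (j + 1) (by omega) (by omega) _ hsz]
      rw [Array.toList_setIfInBounds]
      have hgetset : (dp.toList.set k m).getD k 0 = m := by
        rw [listGetD_set _ _ _ _ _ hk', if_pos rfl]
      rw [hgetset]
      have hcongr : innerVal (dp.toList.set k m) (k : Int) m (j + 1) =
          innerVal dp.toList (k : Int) m (j + 1) := by
        apply innerVal_congr _ _ _ _ _ (by omega)
        intro t ht0 htk
        obtain ⟨t', rfl⟩ : ∃ t' : Nat, (t' : Int) = t := ⟨t.toNat, by omega⟩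
        rw [Int.toNat_natCast, listGetD_set _ _ _ _ _ hk', if_neg (by omega)]
      rw [hcongr, List.set_set]
      conv_rhs => rw [innerVal]
      rw [dif_pos hcond, ← hm]
    · rw [numSquaresInner, dif_neg hcond]
      conv_rhs => rw [innerVal]
      rw [dif_neg hcond, List.getD_eq_getElem _ _ hk', List.set_getElem_self]

theorem numSquaresInner_eq_set (dp : Array Int) (k : Nat) (hk : k < dp.size) :
    (numSquaresInner dp (k : Int) 1).toList =
      dp.toList.set k (innerVal dp.toList (k : Int) (dp.toList.getD k 0) 1) :=
  numSquaresInner_eq_set_fuel k (k + 1) 1 le_rfl (by omega) dp hk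

theorem innerVal_le_v (dp : List Int) (i v : Int) (j : Nat) : innerVal dp i v j ≤ v := by
  fun_induction innerVal dp i v j with
  | case1 v j hcond ih => exact le_trans ih (min_le_left _ _)
  | case2 v j hcond => exact le_rfl

theorem innerVal_le_term (dp : List Int) (k : Nat) (v : Int) (j t : Nat)
    (hjt : j ≤ t) (ht : t * t ≤ k) :
    innerVal dp (k : Int) v j ≤ dp.getD ((k : Int) - (t : Int) * t).toNat 0 + 1 := by
  fun_induction innerVal dp (k : Int) v j with
  | case1 v j hcond ih =>
    by_cases hjt' : t = j
    · subst hjt'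
      exact le_trans (innerVal_le_v _ _ _ _) (min_le_right _ _)
    · exact ih (by omega)
  | case2 v j hcond =>
    exfalso
    have h1 : (j : Int) * j ≤ (t : Int) * t := by
      have : (j : Int) ≤ t := by exact_mod_cast hjt
      nlinarith [Int.natCast_nonneg j]
    have ht' : ((t : Int) * t) ≤ (k : Int) := by exact_mod_cast ht
    omega

theorem innerVal_ge (dp : List Int) (k : Nat) (v : Int) (j : Nat) (hj : 1 ≤ j)
    (hv : ((mU k : Nat) : Int) ≤ v)
    (hterm : ∀ t : Nat, j ≤ t → t * t ≤ k →
      ((mU k : Nat) : Int) ≤ dp.getD ((k : Int) - (t : Int) * t).toNat 0 + 1) :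
    ((mU k : Nat) : Int) ≤ innerVal dp (k : Int) v j := by
  revert hj hv hterm
  fun_induction innerVal dp (k : Int) v j with
  | case1 v j hcond ih =>
    intro hj hv hterm
    refine ih (by omega) (le_min hv ?_) (fun t h1 h2 => hterm t (by omega) h2)
    exact hterm j le_rfl (by exact_mod_cast hcond)
  | case2 v j hcond =>
    intro hj hv hterm
    exact hv

theorem innerVal_mU (dp : List Int) (k : Nat)
    (hdp : ∀ t : Nat, t < k → dp.getD t 0 = ((mU t : Nat) : Int)) :
    innerVal dp (k : Int) (k : Int) 1 = ((mU k : Nat) : Int) := by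
  rcases Nat.eq_zero_or_pos k with hk0 | hk1
  · subst hk0
    rw [innerVal, dif_neg (by norm_num)]
    simp [mU_zero]
  · refine le_antisymm ?_ ?_
    · obtain ⟨j0, hj0, hj0sq, hwit⟩ := mU_witness hk1
      have hle := innerVal_le_term dp k (k : Int) 1 j0 hj0 hj0sq
      have hcast : ((k : Int) - (j0 : Int) * j0).toNat = k - j0 * j0 := by
        have h1 : ((j0 * j0 : Nat) : Int) = (j0 : Int) * j0 := by push_cast; ring
        omega
      rw [hcast, hdp (k - j0 * j0) (by have h9 : 0 < j0 * j0 := Nat.mul_pos (by omega) (by omega); omega)] at hle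
      rw [hwit]
      push_cast at hle ⊢
      omega
    · refine innerVal_ge dp k (k : Int) 1 le_rfl (by exact_mod_cast mU_le_self k) ?_
      intro t h1 h2
      have hcast : ((k : Int) - (t : Int) * t).toNat = k - t * t := by
        have h3 : ((t * t : Nat) : Int) = (t : Int) * t := by push_cast; ring
        omega
      rw [hcast, hdp (k - t * t) (by have h9 : 0 < t * t := Nat.mul_pos (by omega) (by omega); omega)]
      have := mU_cons h1 h2
      push_cast
      omega

theorem loopA (n : Nat) (f : Nat) : ∀ i : Nat, n + 1 ≤ f + i → ∀ dp : Array Int,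
    dp.toList.length = n + 1 →
    (∀ k : Nat, k < i → dp.toList.getD k 0 = ((mU k : Nat) : Int)) →
    (∀ k : Nat, i ≤ k → k ≤ n → dp.toList.getD k 0 = (k : Int)) →
    ((PySem.List.pyRange (i : Int) ((n : Int) + 1) 1).foldl (fun d x => numSquaresInner d x 1) dp).toList.length = n + 1 ∧
    (∀ k : Nat, k ≤ n →
      ((PySem.List.pyRange (i : Int) ((n : Int) + 1) 1).foldl (fun d x => numSquaresInner d x 1) dp).toList.getD k 0 = ((mU k : Nat) : Int)) := by
  induction f with
  | zero =>
    intro i hf dp hlen hlow hhigh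
    rw [PySem.List.pyRange_one_eq_nil (by push_cast; omega), List.foldl_nil]
    exact ⟨hlen, fun k hk => hlow k (by omega)⟩
  | succ f ih =>
    intro i hf dp hlen hlow hhigh
    by_cases hi : i ≤ n
    · rw [PySem.List.pyRange_one_cons (by push_cast; omega), List.foldl_cons]
      have hklen : i < dp.size := by
        have := hlen
        simp at this
        omega
      have hstep : (numSquaresInner dp (i : Int) 1).toList =
          dp.toList.set i ((mU i : Nat) : Int) := by
        rw [numSquaresInner_eq_set dp i hklen, hhigh i le_rfl hi,
          innerVal_mU dp.toList i (fun t ht => hlow t ht)]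
      have hcast : ((i : Int) + 1) = (((i + 1 : Nat) : Int)) := by push_cast; ring
      rw [hcast]
      refine ih (i + 1) (by omega) _ (by rw [hstep]; simpa using hlen) ?_ ?_
      · intro k hk
        rw [hstep]
        rcases Nat.lt_succ_iff_lt_or_eq.mp hk with h | h
        · rw [listGetD_set _ _ _ _ _ (by omega), if_neg (by omega)]
          exact hlow k h
        · subst h
          rw [listGetD_set _ _ _ _ _ (by omega), if_pos rfl]
      · intro k hk1 hk2
        rw [hstep, listGetD_set _ _ _ _ _ (by omega), if_neg (by omega)]
        exact hhigh k (by omega) hk2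
    · rw [PySem.List.pyRange_one_eq_nil (by push_cast; omega), List.foldl_nil]
      exact ⟨hlen, fun k hk => hlow k (by omega)⟩

theorem numSquares_eq_mU (n : Nat) : numSquares (n : Int) = ((mU n : Nat) : Int) := by
  show PySem.List.pyGetD
    ((PySem.List.pyRange 0 ((n : Int) + 1) 1).foldl (fun d i => numSquaresInner d i 1)
      (PySem.List.pyRange 0 ((n : Int) + 1) 1).toArray).toList (-1) 0 = ((mU n : Nat) : Int)
  have hlist : ((PySem.List.pyRange 0 ((n : Int) + 1) 1).toArray).toList =
      PySem.List.pyRange 0 ((n : Int) + 1) 1 := by simp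
  have hlen0 : ((PySem.List.pyRange 0 ((n : Int) + 1) 1).toArray).toList.length = n + 1 := by
    rw [hlist, PySem.List.length_pyRange_one]
    omega
  have hhigh : ∀ k : Nat, 0 ≤ k → k ≤ n →
      ((PySem.List.pyRange 0 ((n : Int) + 1) 1).toArray).toList.getD k 0 = (k : Int) := by
    intro k _ hk
    rw [hlist, List.getD_eq_getElem _ _ (by rw [PySem.List.length_pyRange_one]; omega),
      PySem.List.getElem_pyRange_one]
    ring
  have h0 : ((0 : Nat) : Int) = (0 : Int) := rfl
  obtain ⟨hlenr, hentr⟩ := loopA n (n + 1) 0 (by omega) (PySem.List.pyRange 0 ((n : Int) + 1) 1).toArray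
    hlen0 (fun k hk => absurd hk (Nat.not_lt_zero k)) (fun k hk => hhigh k (Nat.zero_le k))
  rw [h0] at hlenr hentr
  set res := ((PySem.List.pyRange 0 ((n : Int) + 1) 1).foldl (fun d i => numSquaresInner d i 1)
    (PySem.List.pyRange 0 ((n : Int) + 1) 1).toArray).toList with hres
  have hne : res ≠ [] := by
    intro h
    rw [h] at hlenr
    simp at hlenr
  rw [PySem.List.pyGetD_neg_one res 0 hne]
  have hfin := hentr n le_rfl
  rw [List.getD_eq_getElem _ _ (by omega)] at hfin
  rw [List.getLast_eq_getElem]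
  convert hfin using 2
  omega

-- ===== B-side proof: numSquares_alt n = mU n =====

-- spec of the inner square loop, parameterised by the starting square index j
theorem expand_spec (n k rr : Nat) (h1 : 1 ≤ rr) (h2 : rr ≤ n) (hD : mU (n - rr) = k)
    (f : Nat) : ∀ j : Nat, 1 ≤ j → n + 1 ≤ f + j → ∀ (v : Array Bool) (nxt : List Int),
    v.size = n + 1 →
    (∀ m : Nat, m ≤ n → (v.getD m false = true ↔ ((1 ≤ m ∧ mU (n - m) ≤ k) ∨ (m : Int) ∈ nxt))) →
    (∀ x ∈ nxt, ∃ m : Nat, x = (m : Int) ∧ 1 ≤ m ∧ m ≤ n ∧ mU (n - m) = k + 1) →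
    ((altExpand (rr : Int) (altSquares (n : Int) j) v nxt = none ↔ ∃ t : Nat, j ≤ t ∧ t * t = rr)
      ∧ ∀ v' nxt', altExpand (rr : Int) (altSquares (n : Int) j) v nxt = some (v', nxt') →
          v'.size = n + 1
        ∧ (∀ m : Nat, m ≤ n → (v'.getD m false = true ↔ ((1 ≤ m ∧ mU (n - m) ≤ k) ∨ (m : Int) ∈ nxt')))
        ∧ (∀ x ∈ nxt', ∃ m : Nat, x = (m : Int) ∧ 1 ≤ m ∧ m ≤ n ∧ mU (n - m) = k + 1)
        ∧ (∀ x, x ∈ nxt → x ∈ nxt')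
        ∧ (∀ t : Nat, j ≤ t → t * t ≤ rr → v'.getD (rr - t * t) false = true)) := by
  induction f with
  | zero =>
    intro j hj hf v nxt hsz hcoup hnxt
    have hjn : ¬ ((j : Int) * j ≤ (n : Int)) := by
      have : n < j * j := by nlinarith
      push_cast
      exact_mod_cast not_le.mpr (by exact_mod_cast this)
    rw [altSquares, dif_neg hjn]
    refine ⟨by simp [altExpand]; intro t hjt htr; nlinarith, ?_⟩
    intro v' nxt' hsome
    simp only [altExpand, Option.some.injEq, Prod.mk.injEq] at hsome
    obtain ⟨rfl, rfl⟩ := hsome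
    refine ⟨hsz, hcoup, hnxt, fun x hx => hx, ?_⟩
    intro t hjt htr
    exfalso
    nlinarith
  | succ f ih =>
    intro j hj hf v nxt hsz hcoup hnxt
    by_cases hjn : ((j : Int) * j ≤ (n : Int))
    · rw [altSquares, dif_pos hjn]
      have hjjn : j * j ≤ n := by exact_mod_cast hjn
      simp only [altExpand]
      by_cases hbr : (rr : Int) < (j : Int) * j
      · rw [if_pos hbr]
        have hbrN : rr < j * j := by exact_mod_cast hbr
        refine ⟨by simp; intro t hjt; nlinarith, ?_⟩
        intro v' nxt' hsome
        simp only [Option.some.injEq, Prod.mk.injEq] at hsome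
        obtain ⟨rfl, rfl⟩ := hsome
        refine ⟨hsz, hcoup, hnxt, fun x hx => hx, ?_⟩
        intro t hjt htr
        exfalso
        nlinarith
      · rw [if_neg hbr]
        have hjjr : j * j ≤ rr := by
          have : (j : Int) * j ≤ (rr : Int) := not_lt.mp hbr
          exact_mod_cast this
        have hmcast : (rr : Int) - (j : Int) * j = ((rr - j * j : Nat) : Int) := by
          push_cast
          omega
        by_cases hm0 : (rr : Int) - (j : Int) * j = 0
        · rw [if_pos hm0]
          have : rr = j * j := by
            rw [hmcast] at hm0
            omega
          exact ⟨by simp; exact ⟨j, le_rfl, this.symm⟩, by intro v' nxt' h; cases h⟩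
        · rw [if_neg hm0]
          set mm : Nat := rr - j * j with hmm
          have hmm1 : 1 ≤ mm := by
            rw [hmcast] at hm0
            omega
          have hmmn : mm ≤ n := by omega
          have htoNat : ((rr : Int) - (j : Int) * j).toNat = mm := by
            rw [hmcast]
            omega
          have hnotj : rr ≠ j * j := by omega
          by_cases hvm : v.getD ((rr : Int) - (j : Int) * j).toNat false = true
          · rw [if_pos hvm]
            obtain ⟨hiff, hsome⟩ := ih (j + 1) (by omega) (by omega) v nxt hsz hcoup hnxt
            refine ⟨?_, ?_⟩
            · rw [hiff]
              constructor
              · rintro ⟨t, ht1, ht2⟩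
                exact ⟨t, by omega, ht2⟩
              · rintro ⟨t, ht1, ht2⟩
                have htj : t ≠ j := by rintro rfl; exact hnotj ht2.symm
                exact ⟨t, by omega, ht2⟩
            · intro v' nxt' hres
              obtain ⟨hsz', hcoup', hnxt', hmono', hcov'⟩ := hsome v' nxt' hres
              refine ⟨hsz', hcoup', hnxt', hmono', ?_⟩
              intro t hjt htr
              rcases Nat.eq_or_lt_of_le hjt with h | h
              · -- t = j : already-visited element stays visited
                subst h
                rw [htoNat] at hvm
                have := (hcoup mm hmmn).mp hvm
                exact (hcoup' mm hmmn).mpr (this.imp id (hmono' _))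
              · exact hcov' t (by omega) htr
          · rw [if_neg hvm]
            rw [htoNat] at hvm ⊢
            rw [hmcast]
            -- the new state
            have hmmlt : mm < v.size := by omega
            have hv1list : (v.setIfInBounds mm true).toList = v.toList.set mm true :=
              Array.toList_setIfInBounds ..
            have hlen : v.toList.length = n + 1 := by simpa using hsz
            have hv1get : ∀ m' : Nat, (v.setIfInBounds mm true).getD m' false =
                if m' = mm then true else v.getD m' false := by
              intro m'
              rw [arrGetD, arrGetD, hv1list, listGetD_set _ _ _ _ _ (by omega)]
            have hsz1 : (v.setIfInBounds mm true).size = n + 1 := by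
              rw [Array.size_setIfInBounds]
              exact hsz
            have hDmm : mU (n - mm) = k + 1 := by
              have hle : mU (n - mm) ≤ k + 1 := by
                have hsub : n - mm - j * j = n - rr := by omega
                have hjle : j * j ≤ n - mm := by omega
                have := mU_cons hj hjle
                rw [hsub, hD] at this
                exact this
              have hge : ¬ (mU (n - mm) ≤ k) := by
                intro hc
                have : v.getD mm false = true := (hcoup mm hmmn).mpr (Or.inl ⟨hmm1, hc⟩)
                exact hvm this
              omega
            have hcoup1 : ∀ m' : Nat, m' ≤ n →
                ((v.setIfInBounds mm true).getD m' false = true ↔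
                  ((1 ≤ m' ∧ mU (n - m') ≤ k) ∨ (m' : Int) ∈ nxt ++ [((mm : Nat) : Int)])) := by
              intro m' hm'
              rw [hv1get]
              by_cases h : m' = mm
              · subst h
                simp
              · rw [if_neg h, hcoup m' hm']
                simp only [List.mem_append, List.mem_singleton]
                constructor
                · exact fun hh => hh.imp id Or.inl
                · rintro (hh | hh | hh)
                  · exact Or.inl hh
                  · exact Or.inr hh
                  · exact absurd (by exact_mod_cast hh) h
            have hnxt1 : ∀ x ∈ nxt ++ [((mm : Nat) : Int)],
                ∃ m : Nat, x = (m : Int) ∧ 1 ≤ m ∧ m ≤ n ∧ mU (n - m) = k + 1 := by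
              intro x hx
              rcases List.mem_append.mp hx with h | h
              · exact hnxt x h
              · rw [List.mem_singleton] at h
                exact ⟨mm, h, hmm1, hmmn, hDmm⟩
            obtain ⟨hiff, hsome⟩ := ih (j + 1) (by omega) (by omega)
              (v.setIfInBounds mm true) (nxt ++ [((mm : Nat) : Int)]) hsz1 hcoup1 hnxt1
            refine ⟨?_, ?_⟩
            · rw [hiff]
              constructor
              · rintro ⟨t, ht1, ht2⟩
                exact ⟨t, by omega, ht2⟩
              · rintro ⟨t, ht1, ht2⟩
                have htj : t ≠ j := by rintro rfl; exact hnotj ht2.symm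
                exact ⟨t, by omega, ht2⟩
            · intro v' nxt' hres
              obtain ⟨hsz', hcoup', hnxt', hmono', hcov'⟩ := hsome v' nxt' hres
              refine ⟨hsz', hcoup', hnxt', ?_, ?_⟩
              · intro x hx
                exact hmono' x (List.mem_append.mpr (Or.inl hx))
              · intro t hjt htr
                rcases Nat.eq_or_lt_of_le hjt with h | h
                · subst h
                  have hin : ((mm : Nat) : Int) ∈ nxt ++ [((mm : Nat) : Int)] := by simp
                  exact (hcoup' mm hmmn).mpr (Or.inr (hmono' _ hin))
                · exact hcov' t (by omega) htr
    · rw [altSquares, dif_neg hjn]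
      have hjjn : n < j * j := by
        by_contra h
        exact hjn (by exact_mod_cast not_lt.mp h)
      refine ⟨by simp [altExpand]; intro t hjt htr; nlinarith, ?_⟩
      intro v' nxt' hsome
      simp only [altExpand, Option.some.injEq, Prod.mk.injEq] at hsome
      obtain ⟨rfl, rfl⟩ := hsome
      refine ⟨hsz, hcoup, hnxt, fun x hx => hx, ?_⟩
      intro t hjt htr
      exfalso
      nlinarith

-- spec of one whole BFS level
theorem level_spec (n k : Nat) : ∀ F : List Int,
    (∀ x ∈ F, ∃ m : Nat, x = (m : Int) ∧ 1 ≤ m ∧ m ≤ n ∧ mU (n - m) = k) →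
    ∀ (v : Array Bool) (nxt : List Int),
    v.size = n + 1 →
    (∀ m : Nat, m ≤ n → (v.getD m false = true ↔ ((1 ≤ m ∧ mU (n - m) ≤ k) ∨ (m : Int) ∈ nxt))) →
    (∀ x ∈ nxt, ∃ m : Nat, x = (m : Int) ∧ 1 ≤ m ∧ m ≤ n ∧ mU (n - m) = k + 1) →
    ((altLevel (altSquares (n : Int) 1) F v nxt = none ↔ ∃ x ∈ F, ∃ t : Nat, 1 ≤ t ∧ (t : Int) * t = x)
      ∧ ∀ v' nxt', altLevel (altSquares (n : Int) 1) F v nxt = some (v', nxt') →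
          v'.size = n + 1
        ∧ (∀ m : Nat, m ≤ n → (v'.getD m false = true ↔ ((1 ≤ m ∧ mU (n - m) ≤ k) ∨ (m : Int) ∈ nxt')))
        ∧ (∀ x ∈ nxt', ∃ m : Nat, x = (m : Int) ∧ 1 ≤ m ∧ m ≤ n ∧ mU (n - m) = k + 1)
        ∧ (∀ x, x ∈ nxt → x ∈ nxt')
        ∧ (∀ x ∈ F, ∀ rr t : Nat, x = (rr : Int) → 1 ≤ t → t * t ≤ rr → v'.getD (rr - t * t) false = true)) := by
  intro F
  induction F with
  | nil =>
    intro hF v nxt hsz hcoup hnxt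
    refine ⟨by simp [altLevel], ?_⟩
    intro v' nxt' hsome
    simp only [altLevel, Option.some.injEq, Prod.mk.injEq] at hsome
    obtain ⟨rfl, rfl⟩ := hsome
    exact ⟨hsz, hcoup, hnxt, fun x hx => hx, by simp⟩
  | cons x F ihF =>
    intro hF v nxt hsz hcoup hnxt
    obtain ⟨rr, rfl, hrr1, hrrn, hrrD⟩ := hF x (List.mem_cons_self ..)
    obtain ⟨hiffE, hsomeE⟩ := expand_spec n k rr hrr1 hrrn hrrD (n + 1) 1 le_rfl (by omega)
      v nxt hsz hcoup hnxt
    cases hE : altExpand ((rr : Nat) : Int) (altSquares (n : Int) 1) v nxt with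
    | none =>
      obtain ⟨t, ht1, ht2⟩ := hiffE.mp hE
      refine ⟨?_, ?_⟩
      · simp only [altLevel, hE]
        simp only [true_iff]
        exact ⟨((rr : Nat) : Int), List.mem_cons_self .., t, ht1, by exact_mod_cast ht2⟩
      · intro v' nxt' hres
        simp only [altLevel, hE] at hres
        cases hres
    | some st =>
      obtain ⟨v1, nxt1⟩ := st
      obtain ⟨hsz1, hcoup1, hnxt1, hmono1, hcov1⟩ := hsomeE v1 nxt1 hE
      obtain ⟨hiffL, hsomeL⟩ := ihF (fun y hy => hF y (List.mem_cons_of_mem _ hy))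
        v1 nxt1 hsz1 hcoup1 hnxt1
      have hnotsq : ¬ ∃ t : Nat, 1 ≤ t ∧ (t : Int) * t = ((rr : Nat) : Int) := by
        rintro ⟨t, ht1, ht2⟩
        have : altExpand ((rr : Nat) : Int) (altSquares (n : Int) 1) v nxt = none :=
          hiffE.mpr ⟨t, ht1, by exact_mod_cast ht2⟩
        rw [hE] at this
        cases this
      refine ⟨?_, ?_⟩
      · simp only [altLevel, hE]
        rw [hiffL]
        constructor
        · rintro ⟨y, hy, hts⟩
          exact ⟨y, List.mem_cons_of_mem _ hy, hts⟩
        · rintro ⟨y, hy, hts⟩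
          rcases List.mem_cons.mp hy with h | h
          · exact absurd (h ▸ hts) hnotsq
          · exact ⟨y, h, hts⟩
      · intro v' nxt' hres
        simp only [altLevel, hE] at hres
        obtain ⟨hsz', hcoup', hnxt', hmono', hcov'⟩ := hsomeL v' nxt' hres
        refine ⟨hsz', hcoup', hnxt', fun y hy => hmono' y (hmono1 y hy), ?_⟩
        intro y hy rr' t hyr ht1 htr
        rcases List.mem_cons.mp hy with h | h
        · have hrr' : rr' = rr := by
            rw [h] at hyr
            exact_mod_cast hyr.symm
          subst hrr'
          have hv1 := hcov1 t ht1 htr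
          have hmn : rr' - t * t ≤ n := by omega
          have := (hcoup1 _ hmn).mp hv1
          exact (hcoup' _ hmn).mpr (this.imp id (hmono' _))
        · exact hcov' y h rr' t hyr ht1 htr

-- the outer steps loop returns mU n
theorem loopB (n : Nat) (f : Nat) : ∀ s : Nat, 1 ≤ s → n + 1 ≤ f + s →
    ∀ (v : Array Bool) (F : List Int),
    v.size = n + 1 →
    (∀ m : Nat, m ≤ n → (v.getD m false = true ↔ (1 ≤ m ∧ mU (n - m) ≤ s - 1))) →
    (∀ x, x ∈ F ↔ ∃ m : Nat, x = (m : Int) ∧ 1 ≤ m ∧ m ≤ n ∧ mU (n - m) = s - 1) →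
    s ≤ mU n →
    altLoop (altSquares (n : Int) 1) (PySem.List.pyRange (s : Int) ((n : Int) + 1) 1) v F
      = ((mU n : Nat) : Int) := by
  induction f with
  | zero =>
    intro s hs hf v F hsz hcoup hFp hsmu
    exfalso
    have := mU_le_self n
    omega
  | succ f ih =>
    intro s hs hf v F hsz hcoup hFp hsmu
    have hsn : s ≤ n := by
      have := mU_le_self n
      omega
    rw [PySem.List.pyRange_one_cons (by push_cast; omega)]
    simp only [altLoop]
    have hcoup0 : ∀ m : Nat, m ≤ n →
        (v.getD m false = true ↔ ((1 ≤ m ∧ mU (n - m) ≤ s - 1) ∨ (m : Int) ∈ ([] : List Int))) := by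
      intro m hm
      rw [hcoup m hm]
      simp
    obtain ⟨hiffL, hsomeL⟩ := level_spec n (s - 1) F (fun x hx => (hFp x).mp hx) v []
      hsz hcoup0 (by simp)
    rcases Nat.eq_or_lt_of_le hsmu with heq | hlt
    · -- mU n = s : this level reaches 0 and the loop returns s
      obtain ⟨j, hj1, hjn, hwit⟩ := mU_witness (i := n) (by omega)
      have hjD : mU (n - j * j) = s - 1 := by omega
      have hj2 : 1 ≤ j * j := Nat.one_le_iff_ne_zero.mpr (by positivity)
      have hnone : altLevel (altSquares (n : Int) 1) F v [] = none :=
        hiffL.mpr ⟨((j * j : Nat) : Int), (hFp _).mpr ⟨j * j, rfl, hj2, hjn, hjD⟩,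
          j, hj1, by push_cast; ring⟩
      rw [hnone, ← heq]
    · -- s < mU n : the level completes and we recurse
      have hnotnone : altLevel (altSquares (n : Int) 1) F v [] ≠ none := by
        intro hL
        obtain ⟨x, hxF, t, ht1, ht2⟩ := hiffL.mp hL
        obtain ⟨m, rfl, hm1, hmn, hmD⟩ := (hFp x).mp hxF
        have hmt : m = t * t := by exact_mod_cast ht2.symm
        have hcons := mU_cons ht1 (hmt ▸ hmn)
        rw [← hmt, hmD] at hcons
        omega
      cases hL : altLevel (altSquares (n : Int) 1) F v [] with
      | none => exact absurd hL hnotnone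
      | some st =>
        obtain ⟨v', nxt'⟩ := st
        obtain ⟨hsz', hcoup', hnxt', hmono', hcov'⟩ := hsomeL v' nxt' hL
        have hcomp : ∀ m : Nat, m ≤ n → 1 ≤ m → mU (n - m) = s → v'.getD m false = true := by
          intro m hmn hm1 hmD
          have hnm1 : 1 ≤ n - m := by
            rcases Nat.eq_zero_or_pos (n - m) with h | h
            · rw [h, mU_zero] at hmD
              omega
            · exact h
          obtain ⟨t, ht1, htle, htw⟩ := mU_witness (i := n - m) hnm1
          have hrrn : m + t * t ≤ n := by omega
          have hrrD : mU (n - (m + t * t)) = s - 1 := by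
            have hsub : n - (m + t * t) = n - m - t * t := by omega
            rw [hsub]
            omega
          have hxF : (((m + t * t : Nat)) : Int) ∈ F :=
            (hFp _).mpr ⟨m + t * t, rfl, by omega, hrrn, hrrD⟩
          have hcv := hcov' _ hxF (m + t * t) t rfl ht1 (by omega)
          have hmm : m + t * t - t * t = m := by omega
          rw [hmm] at hcv
          exact hcv
        have hcoupS : ∀ m : Nat, m ≤ n →
            (v'.getD m false = true ↔ (1 ≤ m ∧ mU (n - m) ≤ s + 1 - 1)) := by
          intro m hm
          have hs1 : s + 1 - 1 = s := by omega
          rw [hs1, hcoup' m hm]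
          constructor
          · rintro (⟨h1, h2⟩ | hin)
            · exact ⟨h1, by omega⟩
            · obtain ⟨m', hm', h1, h2, h3⟩ := hnxt' _ hin
              have : m = m' := by exact_mod_cast hm'
              subst this
              exact ⟨h1, by omega⟩
          · rintro ⟨h1, h2⟩
            by_cases hle : mU (n - m) ≤ s - 1
            · exact Or.inl ⟨h1, hle⟩
            · have hDm : mU (n - m) = s := by omega
              have := hcomp m hm h1 hDm
              rw [hcoup' m hm] at this
              exact this
        have hFpS : ∀ x, x ∈ nxt' ↔
            ∃ m : Nat, x = (m : Int) ∧ 1 ≤ m ∧ m ≤ n ∧ mU (n - m) = s + 1 - 1 := by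
          intro x
          have hs1 : s + 1 - 1 = s := by omega
          rw [hs1]
          constructor
          · intro hx
            obtain ⟨m', hm', h1, h2, h3⟩ := hnxt' _ hx
            exact ⟨m', hm', h1, h2, by omega⟩
          · rintro ⟨m, rfl, h1, h2, h3⟩
            have := hcomp m h2 h1 h3
            rw [hcoup' m h2] at this
            rcases this with ⟨_, hle⟩ | hin
            · omega
            · exact hin
        have hcast : ((s : Int) + 1) = (((s + 1 : Nat)) : Int) := by push_cast; ring
        rw [hcast]
        exact ih (s + 1) (by omega) (by omega) v' nxt' hsz' hcoupS hFpS (by omega)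

theorem numSquaresAlt_eq_mU (n : Nat) : numSquares_alt (n : Int) = ((mU n : Nat) : Int) := by
  rcases Nat.eq_zero_or_pos n with hn0 | hn1
  · subst hn0
    rw [mU_zero]
    decide
  · show altLoop (altSquares (n : Int) 1) (PySem.List.pyRange 1 ((n : Int) + 1) 1)
      (((List.replicate ((n : Int) + 1).toNat false).toArray).setIfInBounds (n : Int).toNat true)
      [(n : Int)] = ((mU n : Nat) : Int)
    have htn : ((n : Int) + 1).toNat = n + 1 := by omega
    have htn2 : ((n : Int)).toNat = n := by omega
    rw [htn, htn2]
    set v0 := ((List.replicate (n + 1) false).toArray).setIfInBounds n true with hv0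
    have hsz : v0.size = n + 1 := by
      rw [hv0, Array.size_setIfInBounds]
      simp
    have hv0get : ∀ m : Nat, v0.getD m false = (decide (m = n)) := by
      intro m
      rw [hv0, arrGetD, Array.toList_setIfInBounds, List.toList_toArray]
      rw [listGetD_set _ _ _ _ _ (by simp)]
      by_cases h : m = n
      · simp [h]
      · rw [if_neg h]
        by_cases hm : m < n + 1
        · rw [List.getD_eq_getElem _ _ (by simpa using hm)]
          simp [h]
        · rw [List.getD_eq_default _ _ (by simpa using by omega)]
          simp [h]
    have hmU1 : 1 ≤ mU n := by
      rcases Nat.eq_zero_or_pos (mU n) with h | h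
      · exact absurd (mU_eq_zero h) (by omega)
      · exact h
    have hone : ((1 : Nat) : Int) = (1 : Int) := by norm_num
    rw [← hone]
    refine loopB n (n + 1) 1 le_rfl (by omega) v0 [(n : Int)] hsz ?_ ?_ hmU1
    · intro m hm
      rw [hv0get]
      constructor
      · intro h
        have hmn : m = n := by simpa using h
        subst hmn
        simp only [Nat.sub_self, mU_zero]
        omega
      · rintro ⟨h1, h2⟩
        have : n - m = 0 := mU_eq_zero (by omega)
        have : m = n := by omega
        simp [this]
    · intro x
      simp only [List.mem_singleton]
      constructor
      · rintro rfl
        exact ⟨n, rfl, by omega, le_rfl, by simp [mU_zero]⟩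
      · rintro ⟨m, rfl, h1, h2, h3⟩
        have : n - m = 0 := mU_eq_zero h3
        have : m = n := by omega
        simp [this]

-- ===== VERDICT (by name: the statement is the Claim_ definition above) =====
theorem numSquares_spec : Claim_equal_numSquares := by
  intro n _ hpre
  unfold Spec_numSquares
  obtain ⟨m, rfl⟩ : ∃ m : Nat, (m : Int) = n := ⟨n.toNat, Int.toNat_of_nonneg hpre⟩
  rw [numSquares_eq_mU, numSquaresAlt_eq_mU]
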